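-- pv_equiv track=rewrite | github.com/hyunseoky9/AIinterpretability | metapop_value_iteration.py | _all_subset_masks_upto
-- ===== SOURCE A (Python) =====
-- from itertools import combinations
-- from typing import Callable, Dict, Tuple, List
--
-- def _all_subset_masks_upto(n: int, k: int) -> List[int]:
--     """All subset bitmasks of {0..n-1} with size <= k."""
--     masks = [0]
--     for r in range(1, k + 1):
--         for comb in combinations(range(n), r):
--             m = 0
--             for i in comb:
--                 m |= (1 << i)
--             masks.append(m)
--     return masks
-- ===== SOURCE B (Python) =====
-- def _all_subset_masks_upto(n, k):
--     """All subset bitmasks of {0..n-1} with size <= k."""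
--     masks = [0]
--     layer = [(0, 0)]  # (mask, next start index); grow each size-r layer from the previous one
--     for _ in range(k):
--         layer = [(m | (1 << j), j + 1) for (m, s) in layer for j in range(s, n)]
--         masks.extend(m for (m, _) in layer)
--     return masks
-- ===== Notes on version B (the rewrite author's own statement) =====
-- stated objective: alternative
-- what changed: Replaces per-size itertools.combinations enumeration (rebuilding each mask from scratch with an inner bit loop) by a layered dynamic programming pass that extends each size-(r-1) mask with one higher bit, reusing previously built masks.
import Mathlib
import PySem

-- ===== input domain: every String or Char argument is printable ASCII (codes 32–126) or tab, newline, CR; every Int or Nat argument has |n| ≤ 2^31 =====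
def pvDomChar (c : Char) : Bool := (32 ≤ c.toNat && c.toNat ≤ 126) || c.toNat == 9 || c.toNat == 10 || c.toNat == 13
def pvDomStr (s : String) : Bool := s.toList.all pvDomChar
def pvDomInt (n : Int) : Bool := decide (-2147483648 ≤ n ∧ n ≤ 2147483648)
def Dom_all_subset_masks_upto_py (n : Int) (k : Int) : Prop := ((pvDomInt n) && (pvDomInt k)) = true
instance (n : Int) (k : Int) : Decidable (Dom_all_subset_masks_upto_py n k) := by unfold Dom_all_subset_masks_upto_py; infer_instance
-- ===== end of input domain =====

-- B replaces per-size combinations enumeration by a layered DP that extends each mask of the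
-- previous layer with one higher bit (objective: alternative algorithm, same output order).

-- Python's '1 << i' (exact for i ≥ 0; every i fed to it comes from range(n), hence i ≥ 0)
def pvShl (i : Int) : Int := (2 : Int) ^ i.toNat
-- Python's 'a | b' on ints (both operands here are nonnegative; Int.lor is exact)
def pvOr (a b : Int) : Int := Int.lor a b

-- ===== PORT A =====
-- itertools.combinations(xs, r) for a list xs, in itertools' lexicographic order (exact)
def pvCombos : List Int → Nat → List (List Int)
  | _, 0 => [[]]
  | [], _+1 => []
  | x :: xs, r+1 => (pvCombos xs r).map (fun c => x :: c) ++ pvCombos xs (r+1)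

def all_subset_masks_upto_py (n : Int) (k : Int) : List Int :=
  (PySem.List.pyRange 1 (k+1) 1).foldl (fun masks r =>
    (pvCombos (PySem.List.pyRange 0 n 1) r.toNat).foldl (fun ms comb =>
      ms ++ [comb.foldl (fun m i => pvOr m (pvShl i)) 0]) masks) [0]

-- ===== PORT B =====
def all_subset_masks_upto_py_alt (n : Int) (k : Int) : List Int :=
  ((PySem.List.pyRange 0 k 1).foldl (fun (st : List Int × List (Int × Int)) _ =>
      let layer := st.2.flatMap (fun p =>
        (PySem.List.pyRange p.2 n 1).map (fun j => (pvOr p.1 (pvShl j), j + 1)))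
      (st.1 ++ layer.map Prod.fst, layer)) ([0], [((0 : Int), (0 : Int))])).1

-- ===== PRECONDITION & SPEC =====
def Spec_all_subset_masks_upto_py (n : Int) (k : Int) (out : List Int) : Prop := out = all_subset_masks_upto_py_alt n k
instance (n : Int) (k : Int) (out : List Int) : Decidable (Spec_all_subset_masks_upto_py n k out) := by unfold Spec_all_subset_masks_upto_py; infer_instance

-- ===== CLAIM (what is proved, stated in full; the proofs are below) =====
def Claim_equal_all_subset_masks_upto_py : Prop := ∀ (n : Int) (k : Int), Dom_all_subset_masks_upto_py n k → Spec_all_subset_masks_upto_py n k (all_subset_masks_upto_py n k)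

-- ===== LEMMAS AND PROOFS =====

-- 'picks xs': each element of xs together with the strictly-later rest of the list
def pvPicks : List Int → List (Int × List Int)
  | [] => []
  | x :: xs => (x, xs) :: pvPicks xs

-- combinations together with the rest of the list after the last chosen element
def pvC : List Int → Nat → List (List Int × List Int)
  | xs, 0 => [([], xs)]
  | [], _+1 => []
  | x :: xs, r+1 => (pvC xs r).map (fun p => (x :: p.1, p.2)) ++ pvC xs (r+1)

def pvMaskOf (c : List Int) : Int := c.foldl (fun m i => pvOr m (pvShl i)) 0

def pvStart (c : List Int) : Int := match c.getLast? with | none => 0 | some j => j + 1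

def pvG (p : List Int × List Int) : Int × Int := (pvMaskOf p.1, pvStart p.1)

theorem pvCombos_eq_map_fst (xs : List Int) : ∀ r, pvCombos xs r = (pvC xs r).map Prod.fst := by
  induction xs with
  | nil => intro r; cases r <;> simp [pvCombos, pvC]
  | cons x xs ih =>
    intro r
    cases r with
    | zero => simp [pvCombos, pvC]
    | succ r => simp [pvCombos, pvC, ih, Function.comp]

theorem flatMap_congr_mem {α β : Type} (l : List α) (f g : α → List β)
    (h : ∀ x ∈ l, f x = g x) : l.flatMap f = l.flatMap g := by
  induction l with
  | nil => rfl
  | cons x xs ih =>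
    simp only [List.flatMap_cons, h x List.mem_cons_self,
      ih (fun y hy => h y (List.mem_cons_of_mem _ hy))]

theorem pvC_succ (xs : List Int) : ∀ r, pvC xs (r+1)
    = (pvC xs r).flatMap (fun p => (pvPicks p.2).map (fun q => (p.1 ++ [q.1], q.2))) := by
  induction xs with
  | nil => intro r; cases r <;> simp [pvC, pvPicks]
  | cons x xs ih =>
    intro r
    cases r with
    | zero => simp [pvC, pvPicks, ih 0]
    | succ r =>
      simp only [pvC, List.flatMap_append, List.flatMap_map, ← ih]
      congr 1
      rw [show (pvC xs (r+1)).map (fun p => (x :: p.1, p.2))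
            = ((pvC xs r).flatMap (fun p => (pvPicks p.2).map (fun q => (p.1 ++ [q.1], q.2)))).map
                (fun p => (x :: p.1, p.2)) from by rw [← ih]]
      simp only [List.map_flatMap, List.map_map, Function.comp_def]
      simp [List.cons_append]

theorem pvPicks_pyRange (b : Int) : ∀ s, pvPicks (PySem.List.pyRange s b 1)
    = (PySem.List.pyRange s b 1).map (fun j => (j, PySem.List.pyRange (j+1) b 1)) := by
  intro s
  by_cases h : s < b
  · generalize hT : (b - s).toNat = T
    induction T generalizing s with
    | zero => omega
    | succ t iht =>
      rw [PySem.List.pyRange_one_cons h]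
      by_cases h2 : s + 1 < b
      · simp only [pvPicks, List.map_cons]
        rw [iht (s+1) h2 (by omega)]
      · have hn : PySem.List.pyRange (s+1) b 1 = [] := PySem.List.pyRange_one_eq_nil (by omega)
        simp [pvPicks, hn]
  · rw [PySem.List.pyRange_one_eq_nil (by omega)]; rfl

theorem pvMaskOf_append (c : List Int) (j : Int) : pvMaskOf (c ++ [j]) = pvOr (pvMaskOf c) (pvShl j) := by
  simp [pvMaskOf, List.foldl_append]

theorem pvStart_append (c : List Int) (j : Int) : pvStart (c ++ [j]) = j + 1 := by
  simp [pvStart]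

theorem pvC_rest (n : Int) : ∀ r p, p ∈ pvC (PySem.List.pyRange 0 n 1) r →
    p.2 = PySem.List.pyRange (pvStart p.1) n 1 := by
  intro r
  induction r with
  | zero => intro p hp; simp [pvC] at hp; subst hp; rfl
  | succ r ih =>
    intro p hp
    rw [pvC_succ] at hp
    simp only [List.mem_flatMap, List.mem_map] at hp
    obtain ⟨q, hq, qp, hqp, rfl⟩ := hp
    have hrest := ih q hq
    rw [hrest, pvPicks_pyRange] at hqp
    simp only [List.mem_map] at hqp
    obtain ⟨j, _, rfl⟩ := hqp
    simp [pvStart_append]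

theorem layer_step (n : Int) (r : Nat) :
    ((pvC (PySem.List.pyRange 0 n 1) r).map pvG).flatMap (fun p =>
        (PySem.List.pyRange p.2 n 1).map (fun j => (pvOr p.1 (pvShl j), j + 1)))
      = (pvC (PySem.List.pyRange 0 n 1) (r+1)).map pvG := by
  rw [List.flatMap_map, pvC_succ, List.map_flatMap]
  apply flatMap_congr_mem
  intro p hp
  rw [pvC_rest n r p hp, pvPicks_pyRange]
  simp only [pvG, List.map_map, Function.comp_def, pvMaskOf_append, pvStart_append]

theorem main_loop (n : Int) : ∀ (t : Nat) (r : Nat) (acc : List Int),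
    (PySem.List.pyRange ((r : Int) + 1) ((r : Int) + 1 + t) 1).foldl (fun masks rr =>
        (pvCombos (PySem.List.pyRange 0 n 1) rr.toNat).foldl (fun ms comb =>
          ms ++ [comb.foldl (fun m i => pvOr m (pvShl i)) 0]) masks) acc
      = ((PySem.List.pyRange (r : Int) ((r : Int) + t) 1).foldl (fun (st : List Int × List (Int × Int)) _ =>
          let layer := st.2.flatMap (fun p =>
            (PySem.List.pyRange p.2 n 1).map (fun j => (pvOr p.1 (pvShl j), j + 1)))
          (st.1 ++ layer.map Prod.fst, layer)) (acc, (pvC (PySem.List.pyRange 0 n 1) r).map pvG)).1 := by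
  intro t
  induction t with
  | zero =>
    intro r acc
    rw [show PySem.List.pyRange ((r : Int) + 1) ((r : Int) + 1 + ((0 : Nat) : Int)) 1 = []
          from PySem.List.pyRange_one_eq_nil (by omega),
        show PySem.List.pyRange ((r : Int)) ((r : Int) + ((0 : Nat) : Int)) 1 = []
          from PySem.List.pyRange_one_eq_nil (by omega)]
    rfl
  | succ t ih =>
    intro r acc
    rw [show PySem.List.pyRange ((r : Int) + 1) ((r : Int) + 1 + ((t + 1 : Nat) : Int)) 1
          = ((r : Int) + 1) :: PySem.List.pyRange ((r : Int) + 1 + 1) ((r : Int) + 1 + ((t + 1 : Nat) : Int)) 1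
          from PySem.List.pyRange_one_cons (by push_cast; omega),
        show PySem.List.pyRange ((r : Int)) ((r : Int) + ((t + 1 : Nat) : Int)) 1
          = ((r : Int)) :: PySem.List.pyRange ((r : Int) + 1) ((r : Int) + ((t + 1 : Nat) : Int)) 1
          from PySem.List.pyRange_one_cons (by push_cast; omega)]
    simp only [List.foldl_cons]
    rw [show ((r : Int) + 1 + 1) = (((r + 1 : Nat) : Int) + 1) from by push_cast; ring,
        show ((r : Int) + 1 + ((t + 1 : Nat) : Int)) = (((r + 1 : Nat) : Int) + 1 + (t : Int)) from by push_cast; ring,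
        show ((r : Int) + ((t + 1 : Nat) : Int)) = (((r + 1 : Nat) : Int) + (t : Int)) from by push_cast; ring]
    rw [ih (r + 1)]
    have hfun : (List.foldl (fun (m i : Int) => pvOr m (pvShl i)) 0 ∘ Prod.fst)
        = (Prod.fst ∘ pvG) := by
      funext p
      simp [pvG, pvMaskOf, Function.comp]
    rw [show ((r : Int) + 1).toNat = r + 1 from by omega,
        PySem.List.foldl_append_singleton_eq_map, pvCombos_eq_map_fst, List.map_map, hfun,
        ← List.map_map, layer_step]
    simp only [Nat.cast_add, Nat.cast_one]

-- ===== VERDICT (by name: the statement is the Claim_ definition above) =====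
theorem all_subset_masks_upto_py_spec : Claim_equal_all_subset_masks_upto_py := by
  intro n k _
  unfold Spec_all_subset_masks_upto_py all_subset_masks_upto_py all_subset_masks_upto_py_alt
  by_cases hk : k ≤ 0
  · rw [show PySem.List.pyRange 1 (k + 1) 1 = [] from PySem.List.pyRange_one_eq_nil (by omega),
        show PySem.List.pyRange 0 k 1 = [] from PySem.List.pyRange_one_eq_nil (by omega)]
    rfl
  · have h0 : (pvC (PySem.List.pyRange 0 n 1) 0).map pvG = [((0 : Int), (0 : Int))] := by
      simp [pvC, pvG, pvMaskOf, pvStart]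
    have hm := main_loop n k.toNat 0 [0]
    rw [h0] at hm
    simp only [Nat.cast_zero, zero_add] at hm
    rw [show k + 1 = 1 + ((k.toNat : Nat) : Int) from by omega]
    rw [show k = ((k.toNat : Nat) : Int) from by omega]
    exact hm
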